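-- pv_equiv track=rewrite | github.com/Aleksiysh/py_stepic_practical_python | 8/8.7.py | is_passble
-- ===== SOURCE A (Python) =====
-- def get_objects_by_coords(position):
--     rez = []
--     for g_object in game_objects:
--         if game_objects.get(g_object).get('position') == position:
--             rez.append(g_object)
--     return rez
--
-- def is_passble(position):
--     rez = True
--     objects = get_objects_by_coords(position)
--     for obj in objects:
--         if not game_objects[obj]['passable']:
--             rez = False
--             break
--     return rez
--
-- game_objects = {
--     ('wall', 0): {'position': (0, 0), 'passable': False, 'interactable': False, 'char': '#'},
--     ('wall', 1): {'position': (0, 1), 'passable': False, 'interactable': False, 'char': '#'},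
--     ('player',): {'position': (1, 1), 'passable': True, 'interactable': True, 'char': '@', 'coins': 0},
--     ('soft_wall', 11): {'position': (1, 4), 'passable': False, 'interactable': True, 'char': '%'},
--     ('coin', 2): {'position': (1, 2), 'passable': True, 'interactable': True, 'char': '$'}
-- }
-- ===== SOURCE B (Python) =====
-- game_objects = {
--     ('wall', 0): {'position': (0, 0), 'passable': False, 'interactable': False, 'char': '#'},
--     ('wall', 1): {'position': (0, 1), 'passable': False, 'interactable': False, 'char': '#'},
--     ('player',): {'position': (1, 1), 'passable': True, 'interactable': True, 'char': '@', 'coins': 0},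
--     ('soft_wall', 11): {'position': (1, 4), 'passable': False, 'interactable': True, 'char': '%'},
--     ('coin', 2): {'position': (1, 2), 'passable': True, 'interactable': True, 'char': '$'}
-- }
--
-- def is_passble(position):
--     # Invert the question: build the set of positions occupied by an impassable
--     # object, then answer with a single membership test.
--     blocked = {v['position'] for v in game_objects.values() if not v['passable']}
--     return position not in blocked
-- ===== Notes on version B (the rewrite author's own statement) =====
-- stated objective: alternative
-- what changed: Inverted the logic: instead of collecting the keys of objects at the position and scanning them for an impassable one, B builds the set of positions blocked by impassable objects and answers with one membership test.
import Mathlib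
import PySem

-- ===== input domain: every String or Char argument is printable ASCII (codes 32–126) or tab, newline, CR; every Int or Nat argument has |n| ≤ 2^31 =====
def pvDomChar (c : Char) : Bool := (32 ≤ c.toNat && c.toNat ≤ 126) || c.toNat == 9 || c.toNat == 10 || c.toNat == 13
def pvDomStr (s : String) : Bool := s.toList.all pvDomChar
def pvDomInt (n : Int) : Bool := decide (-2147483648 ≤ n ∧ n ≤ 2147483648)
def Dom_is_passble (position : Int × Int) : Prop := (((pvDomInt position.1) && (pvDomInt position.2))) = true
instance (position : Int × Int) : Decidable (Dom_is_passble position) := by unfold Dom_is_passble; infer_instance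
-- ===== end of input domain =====

-- B inverts the question: it builds the set of positions blocked by an impassable object
-- and answers with one membership test, instead of collecting keys at the position and
-- scanning them for an impassable one (objective: alternative decomposition).
-- ===== PORT A =====
-- game_objects dict: key → (position, passable); keys flattened to strings, unused fields dropped
def gameObjects : PySem.Dict String ((Int × Int) × Bool) :=
  PySem.Dict.mk [("wall0", ((0, 0), false)), ("wall1", ((0, 1), false)), ("player", ((1, 1), true)),
   ("soft_wall11", ((1, 4), false)), ("coin2", ((1, 2), true))]

def get_objects_by_coords (position : Int × Int) : List String :=
  gameObjects.items.foldl (fun rez kv => if kv.2.1 == position then rez ++ [kv.1] else rez) []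

-- the for-loop with break, as structural recursion over the collected keys
def isPassbleLoop (position : Int × Int) : List String → Bool
  | [] => true
  | obj :: rest =>
    -- game_objects[obj]['passable']; the key always comes from the dict, so get? is some
    match PySem.Dict.get? gameObjects obj with
    | some v => if !v.2 then false else isPassbleLoop position rest
    | none => isPassbleLoop position rest

def is_passble (position : Int × Int) : Bool :=
  isPassbleLoop position (get_objects_by_coords position)

-- ===== PORT B =====
-- {v['position'] for v in game_objects.values() if not v['passable']}
def blockedPositions : PySem.Set (Int × Int) :=
  PySem.Set.ofList ((gameObjects.values.filter (fun v => !v.2)).map (fun v => v.1))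

def is_passble_alt (position : Int × Int) : Bool :=
  !(PySem.Set.contains blockedPositions position)

-- ===== PRECONDITION & SPEC =====
def Spec_is_passble (position : Int × Int) (out : Bool) : Prop := out = is_passble_alt position
instance (position : Int × Int) (out : Bool) : Decidable (Spec_is_passble position out) := by unfold Spec_is_passble; infer_instance

-- ===== CLAIM (what is proved, stated in full; the proofs are below) =====
def Claim_equal_is_passble : Prop := ∀ (position : Int × Int), Dom_is_passble position → Spec_is_passble position (is_passble position)

-- ===== LEMMAS AND PROOFS =====

-- ===== VERDICT (by name: the statement is the Claim_ definition above) =====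
theorem is_passble_spec : Claim_equal_is_passble := by
  intro p _
  obtain ⟨x, y⟩ := p
  unfold Spec_is_passble is_passble is_passble_alt get_objects_by_coords blockedPositions gameObjects
  by_cases h1 : x = 0 <;> by_cases h2 : x = 1 <;>
  by_cases h3 : y = 0 <;> by_cases h4 : y = 1 <;>
  by_cases h5 : y = 2 <;> by_cases h6 : y = 4 <;>
  subst_vars <;>
  simp_all [isPassbleLoop, gameObjects, PySem.Dict.get?, PySem.Set.contains, PySem.Set.ofList,
    PySem.Set.add, List.find?, Prod.ext_iff] <;>
  split_ifs <;> simp_all [isPassbleLoop]
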